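-- pv_equiv track=rewrite | github.com/Harshith029/uninformed-search | problems/eight_queens.py | display_state
-- ===== SOURCE A (Python) =====
-- N = 8   # board size
--
-- def display_state(state):
--     COL_LABELS = "ABCDEFGH"[:N]
--     lines = []
--     for row in range(N):
--         rank = N - row
--         line = f"  {rank} "
--         for col in range(N):
--             if col < len(state) and state[col] == row:
--                 line += " Q "
--             else:
--                 line += "░░░" if (row + col) % 2 == 0 else "▓▓▓"
--         lines.append(line)
--     lines.append("    " + "".join(f" {c} " for c in COL_LABELS))
--     if len(state) == N:
--         positions = ", ".join(
--             f"{COL_LABELS[c]}{N - state[c]}" for c in range(N)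
--         )
--         lines.append(f"\n  Queens at: {positions}")
--     return "\n".join(lines)
-- ===== SOURCE B (Python) =====
-- N = 8   # board size
--
-- def display_state(state):
--     labels = "ABCDEFGH"[:N]
--     # prebuilt empty checkerboard, one row string per rank
--     rows = [f"  {N - r} " + ("░░░▓▓▓" if r % 2 == 0 else "▓▓▓░░░") * (N // 2)
--             for r in range(N)]
--     # place the queens with one scan of the state: direct index arithmetic
--     # into the prebuilt rows, no per-square test of the 64 cells
--     for col, row in enumerate(state[:N]):
--         if 0 <= row < N:
--             i = 4 + 3 * col
--             rows[row] = rows[row][:i] + " Q " + rows[row][i + 3:]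
--     rows.append("    " + "".join(f" {c} " for c in labels))
--     if len(state) == N:
--         rows.append("\n  Queens at: " + ", ".join(f"{labels[c]}{N - state[c]}" for c in range(N)))
--     return "\n".join(rows)
-- ===== Notes on version B (the rewrite author's own statement) =====
-- stated objective: alternative
-- what changed: B prebuilds the empty checkerboard rows as constant strings and then places queens with a single scan of the state (direct index arithmetic splicing ' Q ' into the target row), instead of A's nested row x column loops testing every one of the 64 squares against the state.
import Mathlib
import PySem

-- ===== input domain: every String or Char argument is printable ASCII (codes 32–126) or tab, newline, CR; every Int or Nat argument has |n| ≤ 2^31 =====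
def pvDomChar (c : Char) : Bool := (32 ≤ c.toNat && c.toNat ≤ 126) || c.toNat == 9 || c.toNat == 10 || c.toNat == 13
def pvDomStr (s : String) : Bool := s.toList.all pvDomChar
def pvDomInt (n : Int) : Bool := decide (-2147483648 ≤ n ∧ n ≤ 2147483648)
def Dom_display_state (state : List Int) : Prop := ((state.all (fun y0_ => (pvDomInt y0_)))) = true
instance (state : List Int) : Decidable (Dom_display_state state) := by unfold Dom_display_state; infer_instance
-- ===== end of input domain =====

-- B prebuilds the eight empty checkerboard rows as constants and places the queens with one
-- scan of the state (index-arithmetic splice into the target row), instead of A's nested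
-- row × column loops testing all 64 squares; same output.

-- ===== PORT A =====
-- Literal port of A: nested loops, each of the 64 cells is chosen by a conditional and
-- appended to the accumulating line string. Strings are carried as List Char (PySem.Chars).
def display_state (state : List Int) : String :=
  let COL_LABELS : List Char := PySem.List.slice "ABCDEFGH".toList none (some 8)
  let lines : List (List Char) :=
    (PySem.List.pyRange 0 8 1).foldl (fun lines row =>
      let rank : Int := 8 - row
      let line0 : List Char := "  ".toList ++ PySem.Int.toChars rank ++ " ".toList
      let line : List Char :=
        (PySem.List.pyRange 0 8 1).foldl (fun line col =>
          if col < (state.length : Int) ∧ PySem.List.pyGetD state col 0 = row then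
            line ++ " Q ".toList
          else
            line ++ (if PySem.Int.mod (row + col) 2 = 0 then "░░░".toList else "▓▓▓".toList))
          line0
      lines ++ [line]) []
  let lines := lines ++ ["    ".toList ++ PySem.Chars.join [] (COL_LABELS.map (fun c => [' ', c, ' ']))]
  let lines :=
    if state.length = 8 then
      let positions : List Char :=
        PySem.Chars.join ", ".toList
          ((PySem.List.pyRange 0 8 1).map (fun c =>
            [PySem.List.pyGetD COL_LABELS c ' '] ++ PySem.Int.toChars (8 - PySem.List.pyGetD state c 0)))
      lines ++ ["\n  Queens at: ".toList ++ positions]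
    else lines
  String.ofList (PySem.Chars.join "\n".toList lines)

-- ===== PORT B =====
-- Literal port of B (Source B): the eight empty rows are prebuilt ('str * int' ported as
-- List.replicate + flatten, exact for the nonnegative count 8 // 2), then one scan of
-- enumerate(state[:8]) splices " Q " into row `row` at offset 4 + 3*col; the guard
-- 0 ≤ row < 8 makes the Python index rows[row] in range, so pyGetD's default is unreachable;
-- the slice assignment rows[row] = rows[row][:i] + " Q " + rows[row][i+3:] is the two slices ++.
def display_state_alt (state : List Int) : String :=
  let labels : List Char := PySem.List.slice "ABCDEFGH".toList none (some 8)
  let rows : List (List Char) :=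
    (PySem.List.pyRange 0 8 1).map (fun r =>
      ("  ".toList ++ PySem.Int.toChars (8 - r) ++ " ".toList) ++
        (List.replicate (PySem.Int.floordiv 8 2).toNat
          (if PySem.Int.mod r 2 = 0 then "░░░▓▓▓".toList else "▓▓▓░░░".toList)).flatten)
  let rows : List (List Char) :=
    (PySem.List.enumerate (PySem.List.slice state none (some 8))).foldl
      (fun rows cr =>
        if 0 ≤ cr.2 ∧ cr.2 < 8 then
          PySem.List.pySetD rows cr.2
            (PySem.List.slice (PySem.List.pyGetD rows cr.2 []) none (some (4 + 3 * cr.1)) ++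
              " Q ".toList ++
              PySem.List.slice (PySem.List.pyGetD rows cr.2 []) (some (4 + 3 * cr.1 + 3)) none)
        else rows) rows
  let rows := rows ++ ["    ".toList ++ PySem.Chars.join [] (labels.map (fun c => [' ', c, ' ']))]
  let rows :=
    if state.length = 8 then
      rows ++ ["\n  Queens at: ".toList ++ PySem.Chars.join ", ".toList
        ((PySem.List.pyRange 0 8 1).map (fun c =>
          [PySem.List.pyGetD labels c ' '] ++ PySem.Int.toChars (8 - PySem.List.pyGetD state c 0)))]
    else rows
  String.ofList (PySem.Chars.join "\n".toList rows)

-- ===== PRECONDITION & SPEC =====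
def Spec_display_state (state : List Int) (out : String) : Prop := out = display_state_alt state
instance (state : List Int) (out : String) : Decidable (Spec_display_state state out) := by unfold Spec_display_state; infer_instance

-- ===== CLAIM (what is proved, stated in full; the proofs are below) =====
def Claim_equal_display_state : Prop := ∀ (state : List Int), Dom_display_state state → Spec_display_state state (display_state state)

-- ===== LEMMAS AND PROOFS =====

-- the queen glyph, the rank prefix, the checkerboard cell, a rendered rank line
def pvQ : List Char := " Q ".toList
def pvP (r : Int) : List Char := "  ".toList ++ PySem.Int.toChars (8 - r) ++ " ".toList
def pvShade (r c : Int) : List Char :=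
  if PySem.Int.mod (r + c) 2 = 0 then "░░░".toList else "▓▓▓".toList
def pvLine (f : Int → Int → List Char) (r : Int) : List Char :=
  pvP r ++ ((PySem.List.pyRange 0 8 1).map (f r)).flatten
-- A's per-cell content
def pvAcell (state : List Int) (r c : Int) : List Char :=
  if c < (state.length : Int) ∧ PySem.List.pyGetD state c 0 = r then pvQ else pvShade r c
-- one queen placement as a function update
def pvUpd (f : Int → Int → List Char) (p : Int × Int) : Int → Int → List Char :=
  if 0 ≤ p.2 ∧ p.2 < 8 then (fun r c => if r = p.2 ∧ c = p.1 then pvQ else f r c) else f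

lemma pvShade_len (r c : Int) : (pvShade r c).length = 3 := by
  unfold pvShade; split <;> rfl

lemma pvUpd_len (f : Int → Int → List Char) (p : Int × Int)
    (h : ∀ r c, (f r c).length = 3) : ∀ r c, (pvUpd f p r c).length = 3 := by
  intro r c; unfold pvUpd; split
  · dsimp only
    split
    · rfl
    · exact h r c
  · exact h r c

lemma pvP_len {r : Int} (h0 : 0 ≤ r) (h1 : r < 8) : (pvP r).length = 4 := by
  interval_cases r <;> rfl

lemma pvLine_congr {f g : Int → Int → List Char} (r : Int)
    (h : ∀ c, 0 ≤ c → c < 8 → f r c = g r c) : pvLine f r = pvLine g r := by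
  unfold pvLine
  congr 1
  congr 1
  apply List.map_congr_left
  intro c hc
  rw [PySem.List.mem_pyRange_one] at hc
  exact h c hc.1 hc.2

lemma flatten_take_blocks (cs : List (List Char)) :
    ∀ (k : Nat), (∀ x ∈ cs, x.length = 3) →
      cs.flatten.take (3 * k) = (cs.take k).flatten := by
  induction cs with
  | nil => intro k _; simp
  | cons c t ih =>
    intro k hlen
    cases k with
    | zero => simp
    | succ k =>
      have hc : c.length = 3 := hlen c (by simp)
      simp only [List.flatten_cons, List.take_succ_cons, List.take_append]
      rw [List.take_of_length_le (by omega), hc,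
        show 3 * (k + 1) - 3 = 3 * k by omega,
        ih k (fun x hx => hlen x (by simp [hx]))]

lemma flatten_drop_blocks (cs : List (List Char)) :
    ∀ (k : Nat), (∀ x ∈ cs, x.length = 3) →
      cs.flatten.drop (3 * k) = (cs.drop k).flatten := by
  induction cs with
  | nil => intro k _; simp
  | cons c t ih =>
    intro k hlen
    cases k with
    | zero => simp
    | succ k =>
      have hc : c.length = 3 := hlen c (by simp)
      simp only [List.flatten_cons, List.drop_succ_cons, List.drop_append]
      rw [List.drop_of_length_le (by omega), hc,
        show 3 * (k + 1) - 3 = 3 * k by omega,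
        ih k (fun x hx => hlen x (by simp [hx]))]
      simp

-- setting index k of a mapped range pushes the update into the mapped function
lemma set_map_range (n k : Nat) (g : Nat → List Char) (v : List Char) (hk : k < n) :
    ((List.range n).map g).set k v
      = (List.range n).map (fun i => if i = k then v else g i) := by
  apply List.ext_getElem (by simp)
  intro i h1 h2
  simp only [List.getElem_set, List.getElem_map, List.getElem_range]
  by_cases h : i = k
  · subst h; simp
  · rw [if_neg (fun hh => h hh.symm), if_neg h]

lemma set_map_pyRange (g : Int → List Char) (v : List Char) (k : Nat) (hk : k < 8) :
    (((PySem.List.pyRange 0 8 1).map g).set k v)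
      = (PySem.List.pyRange 0 8 1).map (fun i => if i = (k : Int) then v else g i) := by
  rw [show (8 : Int) = ((8 : Nat) : Int) by norm_num, PySem.List.pyRange_zero_natCast,
    List.map_map, List.map_map, set_map_range 8 k _ v hk]
  apply List.map_congr_left
  intro i _
  simp only [Function.comp_apply]
  by_cases h : i = k
  · subst h; simp
  · rw [if_neg h, if_neg (by intro hh; exact h (by exact_mod_cast hh))]

lemma take_app (l1 l2 : List Char) (n : Nat) (h : l1.length = 4) :
    (l1 ++ l2).take (4 + n) = l1 ++ l2.take n := by
  rw [List.take_append, List.take_of_length_le (by omega), h,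
    show 4 + n - 4 = n by omega]

lemma drop_app (l1 l2 : List Char) (n : Nat) (h : l1.length = 4) :
    (l1 ++ l2).drop (4 + n) = l2.drop n := by
  rw [List.drop_append, List.drop_of_length_le (by omega), h,
    show 4 + n - 4 = n by omega, List.nil_append]

-- splicing " Q " at character offset 4 + 3*col of a rendered line replaces exactly cell col
lemma splice_cell (f : Int → Int → List Char) (row col : Int)
    (hr0 : 0 ≤ row) (hr : row < 8) (hc0 : 0 ≤ col) (hc : col < 8)
    (hlen : ∀ c, (f row c).length = 3) :
    PySem.List.slice (pvLine f row) none (some (4 + 3 * col)) ++ " Q ".toList ++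
      PySem.List.slice (pvLine f row) (some (4 + 3 * col + 3)) none
    = pvLine (fun r c => if r = row ∧ c = col then pvQ else f r c) row := by
  have hP : (pvP row).length = 4 := pvP_len hr0 hr
  have hcslen : ∀ x ∈ (PySem.List.pyRange 0 8 1).map (f row), x.length = 3 := by
    intro x hx
    obtain ⟨c, _, rfl⟩ := List.mem_map.1 hx
    exact hlen c
  have hcsl : ((PySem.List.pyRange 0 8 1).map (f row)).length = 8 := by
    simp [PySem.List.length_pyRange_one]
  have hk : col.toNat < 8 := by omega
  have hL : pvLine f row = pvP row ++ ((PySem.List.pyRange 0 8 1).map (f row)).flatten := rfl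
  rw [PySem.List.slice_to (pvLine f row) (b := 4 + 3 * col) (by omega),
      PySem.List.slice_from (pvLine f row) (a := 4 + 3 * col + 3) (by omega), hL]
  rw [show (4 + 3 * col).toNat = 4 + 3 * col.toNat by omega,
      show (4 + 3 * col + 3).toNat = 4 + (3 * col.toNat + 3) by omega]
  rw [take_app _ _ _ hP, drop_app _ _ _ hP]
  rw [flatten_take_blocks _ col.toNat hcslen,
      show 3 * col.toNat + 3 = 3 * (col.toNat + 1) by ring,
      flatten_drop_blocks _ (col.toNat + 1) hcslen]
  have hmap : (PySem.List.pyRange 0 8 1).map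
        ((fun r c => if r = row ∧ c = col then pvQ else f r c) row)
      = ((PySem.List.pyRange 0 8 1).map (f row)).set col.toNat pvQ := by
    rw [set_map_pyRange (f row) pvQ col.toNat hk]
    apply List.map_congr_left
    intro i _
    have hcast : ((col.toNat : Nat) : Int) = col := Int.toNat_of_nonneg hc0
    dsimp only
    by_cases h : i = col
    · rw [if_pos ⟨rfl, h⟩, if_pos (by omega)]
    · rw [if_neg (by rintro ⟨_, hh⟩; exact h hh), if_neg (by omega)]
  unfold pvLine
  rw [hmap, List.set_eq_take_append_cons_drop, if_pos (by omega)]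
  simp [List.append_assoc, pvQ]

-- the whole queen scan: folding the splice step over any pair list with in-range columns
lemma scan (ps : List (Int × Int)) :
    ∀ (f : Int → Int → List Char),
      (∀ p ∈ ps, 0 ≤ p.1 ∧ p.1 < 8) →
      (∀ r c, (f r c).length = 3) →
      ps.foldl (fun rows cr =>
          if 0 ≤ cr.2 ∧ cr.2 < 8 then
            PySem.List.pySetD rows cr.2
              (PySem.List.slice (PySem.List.pyGetD rows cr.2 []) none (some (4 + 3 * cr.1)) ++
                " Q ".toList ++
                PySem.List.slice (PySem.List.pyGetD rows cr.2 []) (some (4 + 3 * cr.1 + 3)) none)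
          else rows)
        ((PySem.List.pyRange 0 8 1).map (pvLine f))
      = (PySem.List.pyRange 0 8 1).map (pvLine (ps.foldl pvUpd f)) := by
  induction ps with
  | nil => intro f _ _; rfl
  | cons p t ih =>
    intro f hp hlen
    simp only [List.foldl_cons]
    have hstep :
        (if 0 ≤ p.2 ∧ p.2 < 8 then
          PySem.List.pySetD ((PySem.List.pyRange 0 8 1).map (pvLine f)) p.2
            (PySem.List.slice
                (PySem.List.pyGetD ((PySem.List.pyRange 0 8 1).map (pvLine f)) p.2 []) none
                (some (4 + 3 * p.1)) ++ " Q ".toList ++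
              PySem.List.slice
                (PySem.List.pyGetD ((PySem.List.pyRange 0 8 1).map (pvLine f)) p.2 [])
                (some (4 + 3 * p.1 + 3)) none)
        else (PySem.List.pyRange 0 8 1).map (pvLine f))
        = (PySem.List.pyRange 0 8 1).map (pvLine (pvUpd f p)) := by
      by_cases h : 0 ≤ p.2 ∧ p.2 < 8
      · rw [if_pos h]
        have hc := hp p (List.mem_cons_self ..)
        rw [PySem.List.pyGetD_map_pyRange_of_nonneg (pvLine f) 8 p.2 [] h.1 h.2,
          PySem.List.pySetD_of_nonneg _ _ h.1,
          splice_cell f p.2 p.1 h.1 h.2 hc.1 hc.2 (fun c => hlen p.2 c),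
          set_map_pyRange (pvLine f) _ p.2.toNat (by omega)]
        apply List.map_congr_left
        intro i hi
        rw [PySem.List.mem_pyRange_one] at hi
        have h2 : ((p.2.toNat : Nat) : Int) = p.2 := Int.toNat_of_nonneg h.1
        by_cases hip : i = p.2
        · rw [if_pos (by omega), hip]
          apply pvLine_congr
          intro c _ _
          unfold pvUpd
          rw [if_pos h]
        · rw [if_neg (by omega)]
          apply pvLine_congr
          intro c _ _
          unfold pvUpd
          rw [if_pos h]
          rw [if_neg (by rintro ⟨hh, _⟩; exact hip hh)]
      · rw [if_neg h]
        have : pvUpd f p = f := by unfold pvUpd; rw [if_neg h]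
        rw [this]
    rw [hstep, ih (pvUpd f p) (fun q hq => hp q (List.mem_cons_of_mem _ hq)) (pvUpd_len f p hlen)]

lemma pyGetD_cons_shift (q : Int) (t : List Int) (i : Int)
    (h1 : 1 ≤ i) (h2 : i < (t.length : Int) + 1) :
    PySem.List.pyGetD (q :: t) i 0 = PySem.List.pyGetD t (i - 1) 0 := by
  rw [PySem.List.pyGetD_eq_getElem _ _ (by omega) (by push_cast [List.length_cons]; omega),
      PySem.List.pyGetD_eq_getElem _ _ (by omega) (by omega)]
  have hi : i.toNat = (i - 1).toNat + 1 := by omega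
  simp only [hi, List.getElem_cons_succ]

-- what the accumulated updates compute pointwise
lemma foldl_pvUpd_char (qs : List Int) :
    ∀ (k : Int) (f : Int → Int → List Char) (r c : Int),
      ((PySem.List.enumerate qs k).foldl pvUpd f) r c
      = if k ≤ c ∧ c < k + (qs.length : Int) ∧ 0 ≤ r ∧ r < 8 ∧
            PySem.List.pyGetD qs (c - k) 0 = r then pvQ else f r c := by
  induction qs with
  | nil =>
    intro k f r c
    rw [show PySem.List.enumerate ([] : List Int) k = [] from rfl]
    simp only [List.foldl_nil]
    rw [if_neg]
    rintro ⟨h1, h2, -⟩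
    simp only [List.length_nil, Nat.cast_zero, add_zero] at h2
    omega
  | cons q t ih =>
    intro k f r c
    rw [PySem.List.enumerate_cons, List.foldl_cons, ih]
    by_cases hck : c = k
    · subst hck
      rw [if_neg (by rintro ⟨h1, -⟩; omega), sub_self, PySem.List.pyGetD_zero_cons]
      unfold pvUpd
      by_cases hq : 0 ≤ q ∧ q < 8
      · rw [if_pos hq]
        by_cases hr : 0 ≤ r ∧ r < 8 ∧ q = r
        · rw [if_pos ⟨hr.2.2.symm, rfl⟩,
            if_pos ⟨le_refl _, by simp only [List.length_cons]; push_cast; omega, hr.1, hr.2.1, hr.2.2⟩]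
        · rw [if_neg (by rintro ⟨rfl, -⟩; exact hr ⟨hq.1, hq.2, rfl⟩),
            if_neg (by rintro ⟨-, -, a3, a4, a5⟩; exact hr ⟨a3, a4, a5⟩)]
      · rw [if_neg hq, if_neg (by rintro ⟨-, -, a3, a4, a5⟩; exact hq ⟨by omega, by omega⟩)]
    · by_cases hB : k ≤ c ∧ c < k + ((q :: t).length : Int) ∧ 0 ≤ r ∧ r < 8 ∧
          PySem.List.pyGetD (q :: t) (c - k) 0 = r
      · obtain ⟨b1, b2, b3, b4, b5⟩ := hB
        have hb2 : c < k + (t.length : Int) + 1 := by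
          simp only [List.length_cons] at b2; push_cast at b2; omega
        have b5' : PySem.List.pyGetD t (c - (k + 1)) 0 = r := by
          rw [show c - (k + 1) = c - k - 1 by ring,
            ← pyGetD_cons_shift q t (c - k) (by omega) (by omega)]
          exact b5
        rw [if_pos ⟨by omega, by omega, b3, b4, b5'⟩, if_pos ⟨b1, b2, b3, b4, b5⟩]
      · rw [if_neg hB]
        have hA : ¬(k + 1 ≤ c ∧ c < k + 1 + (t.length : Int) ∧ 0 ≤ r ∧ r < 8 ∧
            PySem.List.pyGetD t (c - (k + 1)) 0 = r) := by
          rintro ⟨a1, a2, a3, a4, a5⟩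
          apply hB
          refine ⟨by omega, by simp only [List.length_cons]; push_cast; omega, a3, a4, ?_⟩
          rw [pyGetD_cons_shift q t (c - k) (by omega) (by omega),
            show c - k - 1 = c - (k + 1) by ring]
          exact a5
        rw [if_neg hA]
        unfold pvUpd
        by_cases hq : 0 ≤ q ∧ q < 8
        · rw [if_pos hq]
          rw [if_neg (by rintro ⟨-, hh⟩; exact hck hh)]
        · rw [if_neg hq]

-- the prebuilt empty rows are the checkerboard lines
lemma base_rows :
    (PySem.List.pyRange 0 8 1).map (fun r =>
      ("  ".toList ++ PySem.Int.toChars (8 - r) ++ " ".toList) ++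
        (List.replicate (PySem.Int.floordiv 8 2).toNat
          (if PySem.Int.mod r 2 = 0 then "░░░▓▓▓".toList else "▓▓▓░░░".toList)).flatten)
    = (PySem.List.pyRange 0 8 1).map (pvLine pvShade) := by
  apply List.map_congr_left
  intro r hr
  rw [PySem.List.mem_pyRange_one] at hr
  obtain ⟨h0, h1⟩ := hr
  unfold pvLine pvP
  congr 1
  interval_cases r <;> decide

-- A's line loop produces exactly the per-cell rendering
lemma A_lines (state : List Int) :
    (PySem.List.pyRange 0 8 1).foldl (fun lines row =>
      lines ++ [(PySem.List.pyRange 0 8 1).foldl (fun line col =>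
          if col < (state.length : Int) ∧ PySem.List.pyGetD state col 0 = row then
            line ++ " Q ".toList
          else
            line ++ (if PySem.Int.mod (row + col) 2 = 0 then "░░░".toList else "▓▓▓".toList))
        ("  ".toList ++ PySem.Int.toChars (8 - row) ++ " ".toList)]) []
    = (PySem.List.pyRange 0 8 1).map (pvLine (pvAcell state)) := by
  rw [PySem.List.foldl_append_singleton_eq_map, List.nil_append]
  apply List.map_congr_left
  intro row _
  have hfun : (fun (line : List Char) (col : Int) =>
      if col < (state.length : Int) ∧ PySem.List.pyGetD state col 0 = row then
        line ++ " Q ".toList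
      else
        line ++ (if PySem.Int.mod (row + col) 2 = 0 then "░░░".toList else "▓▓▓".toList))
      = fun line col => line ++ pvAcell state row col := by
    funext line col
    unfold pvAcell pvShade pvQ
    by_cases h : col < (state.length : Int) ∧ PySem.List.pyGetD state col 0 = row
    · rw [if_pos h, if_pos h]
    · rw [if_neg h, if_neg h]
  rw [hfun, PySem.List.foldl_append_eq_flatMap, List.flatMap_def]
  rfl

-- ===== VERDICT (by name: the statement is the Claim_ definition above) =====
theorem display_state_spec : Claim_equal_display_state := by
  intro state _
  unfold Spec_display_state
  simp only [display_state, display_state_alt]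
  have hqs : PySem.List.slice state none (some 8) = state.take 8 := by
    rw [PySem.List.slice_to state (b := 8) (by norm_num)]
    rfl
  have hmem : ∀ p ∈ PySem.List.enumerate (PySem.List.slice state none (some 8)) 0,
      0 ≤ p.1 ∧ p.1 < 8 := by
    intro p hp
    rw [PySem.List.mem_enumerate_iff] at hp
    obtain ⟨j, hj, rfl⟩ := hp
    have hle : (PySem.List.slice state none (some 8)).length ≤ 8 := by
      rw [hqs]; simp [List.length_take]
    dsimp only
    exact ⟨by omega, by omega⟩
  rw [A_lines, base_rows, scan _ pvShade hmem (fun r c => pvShade_len r c)]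
  have hAB : (PySem.List.pyRange 0 8 1).map (pvLine (pvAcell state))
      = (PySem.List.pyRange 0 8 1).map (pvLine
          ((PySem.List.enumerate (PySem.List.slice state none (some 8)) 0).foldl pvUpd pvShade)) := by
    apply List.map_congr_left
    intro r hr
    rw [PySem.List.mem_pyRange_one] at hr
    apply pvLine_congr
    intro c hc0 hc8
    rw [foldl_pvUpd_char, sub_zero, zero_add, hqs]
    unfold pvAcell
    have hlen8 : ((state.take 8).length : Int) = min 8 (state.length : Int) := by
      rw [List.length_take]; push_cast; rfl
    by_cases h : c < (state.length : Int) ∧ PySem.List.pyGetD state c 0 = r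
    · have hcq : c < ((state.take 8).length : Int) := by rw [hlen8]; omega
      have hget : PySem.List.pyGetD (state.take 8) c 0 = PySem.List.pyGetD state c 0 := by
        rw [PySem.List.pyGetD_eq_getElem _ _ hc0 hcq,
            PySem.List.pyGetD_eq_getElem _ _ hc0 h.1]
        exact List.getElem_take ..
      rw [if_pos h, if_pos ⟨hc0, hcq, hr.1, hr.2, by rw [hget]; exact h.2⟩]
    · rw [if_neg h, if_neg ?hx]
      case hx =>
        rintro ⟨hx0, hx1, -, -, hx4⟩
        apply h
        have hcl : c < (state.length : Int) := by rw [hlen8] at hx1; omega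
        refine ⟨hcl, ?_⟩
        rw [← hx4, PySem.List.pyGetD_eq_getElem _ _ hc0 hx1,
            PySem.List.pyGetD_eq_getElem _ _ hc0 hcl]
        exact (List.getElem_take ..).symm
  rw [hAB]
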